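-- pv_equiv track=rewrite | github.com/maxbeny999/sesac_prac | recap/codedump_prac.py | solution
-- ===== SOURCE A (Python) =====
-- def solution(n):
--     answer = 0
--     for number in range(1, n+1):
--         nums = str(number)
--         for target_number in nums:
--             if target_number == "3" or target_number == "6" or target_number == "9":
--                 answer += 1
--                 break
--     return answer
-- ===== SOURCE B (Python) =====
-- ALLOWED = (0, 1, 2, 4, 5, 7, 8)
--
--
-- def _ok(q):
--     # True iff no digit of q (q >= 0) is 3, 6 or 9
--     while q > 0:
--         if q % 10 in (3, 6, 9):
--             return False
--         q //= 10
--     return True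
--
--
-- def _avoiders(n):
--     # number of x in [0, n] none of whose digits is 3, 6 or 9
--     if n < 0:
--         return 0
--     if n < 10:
--         return sum(1 for d in ALLOWED if d <= n)
--     q, r = divmod(n, 10)
--     return 7 * _avoiders(q - 1) + (sum(1 for d in ALLOWED if d <= r) if _ok(q) else 0)
--
--
-- def solution(n):
--     if n <= 0:
--         return 0
--     return n - (_avoiders(n) - 1)
-- ===== Notes on version B (the rewrite author's own statement) =====
-- stated objective: faster
-- what changed: Replaces the per-number digit scan over all of 1..n by complement digit counting: a O(log n) recursion counts the numbers in [0,n] that avoid the digits 3/6/9 (7 choices per position, handled by recursing on n//10) and subtracts.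
import Mathlib
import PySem

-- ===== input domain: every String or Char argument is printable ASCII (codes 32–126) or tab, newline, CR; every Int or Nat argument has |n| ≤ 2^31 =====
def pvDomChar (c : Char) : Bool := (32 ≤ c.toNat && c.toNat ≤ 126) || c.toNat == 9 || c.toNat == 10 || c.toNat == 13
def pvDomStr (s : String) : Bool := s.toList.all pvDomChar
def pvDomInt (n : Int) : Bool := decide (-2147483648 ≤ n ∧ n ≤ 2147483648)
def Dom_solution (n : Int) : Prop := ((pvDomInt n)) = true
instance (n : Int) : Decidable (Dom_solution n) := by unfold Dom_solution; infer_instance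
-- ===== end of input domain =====

-- B replaces A's linear scan of 1..n by an O(log n) complement count of the numbers avoiding digits 3/6/9 (objective: faster).

-- ===== PORT A =====
-- the inner 'for target_number in nums: if … : answer += 1; break'
def solInner (answer : Int) : List Char → Int
  | [] => answer
  | c :: cs => if c = '3' || c = '6' || c = '9' then answer + 1 else solInner answer cs

def solution (n : Int) : Int :=
  (PySem.List.pyRange 1 (n + 1) 1).foldl
    (fun answer number => solInner answer (PySem.Int.toStr number).toList) 0

-- ===== PORT B =====
def allowedB : List Int := [0, 1, 2, 4, 5, 7, 8]

-- sum(1 for d in ALLOWED if d <= x)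
def countLeB (x : Int) : Int :=
  allowedB.foldl (fun s d => if d ≤ x then s + 1 else s) 0

-- _ok(q): while-loop over the digits of q
def okB (q : Int) : Bool :=
  if h : 0 < q then
    if [3, 6, 9].contains (PySem.Int.mod q 10) then false
    else okB (PySem.Int.floordiv q 10)
  else true
termination_by q.toNat
decreasing_by
  have h10 : PySem.Int.floordiv q 10 = q / 10 := PySem.Int.floordiv_eq_ediv_of_pos (by omega)
  rw [h10]; omega

-- _avoiders(n): count of x in [0, n] with no digit 3, 6 or 9
def avB (n : Int) : Int :=
  if n < 0 then 0
  else if n < 10 then countLeB n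
  else
    7 * avB (PySem.Int.floordiv n 10 - 1) +
      (if okB (PySem.Int.floordiv n 10) then countLeB (PySem.Int.mod n 10) else 0)
termination_by n.toNat
decreasing_by
  have h10 : PySem.Int.floordiv n 10 = n / 10 := PySem.Int.floordiv_eq_ediv_of_pos (by omega)
  rw [h10]; omega

def solution_alt (n : Int) : Int :=
  if n ≤ 0 then 0 else n - (avB n - 1)

-- ===== PRECONDITION & SPEC =====
def Spec_solution (n : Int) (out : Int) : Prop := out = solution_alt n
instance (n : Int) (out : Int) : Decidable (Spec_solution n out) := by unfold Spec_solution; infer_instance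

-- ===== CLAIM (what is proved, stated in full; the proofs are below) =====
def Claim_equal_solution : Prop := ∀ (n : Int), Dom_solution n → Spec_solution n (solution n)

-- ===== LEMMAS AND PROOFS =====

-- proof-side model: a number avoids {3,6,9} iff none of its base-10 digits is 3, 6 or 9
-- (fuel-indexed so that it is structural and kernel-reducible)
def avoidA : Nat → Nat → Bool
  | 0, _ => true
  | fuel + 1, m =>
    if m = 0 then true
    else if m % 10 = 3 ∨ m % 10 = 6 ∨ m % 10 = 9 then false
    else avoidA fuel (m / 10)

def avoidN (m : Nat) : Bool := avoidA m m

-- number of avoiders in [0, m)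
def cnt0 (m : Nat) : Nat := (List.range m).countP (fun x => avoidN x)

def hitC (c : Char) : Bool := c = '3' || c = '6' || c = '9'
def hitL (cs : List Char) : Bool := cs.any hitC

lemma avoidA_congr : ∀ f1 f2 m, m ≤ f1 → m ≤ f2 → avoidA f1 m = avoidA f2 m := by
  intro f1
  induction f1 with
  | zero =>
    intro f2 m h1 _
    have hm : m = 0 := by omega
    subst hm
    cases f2 <;> simp [avoidA]
  | succ f ih =>
    intro f2 m h1 h2
    rcases m with _ | m
    · cases f2 <;> simp [avoidA]
    · rcases f2 with _ | g
      · omega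
      · simp only [avoidA, Nat.succ_ne_zero, if_false]
        by_cases h : (m + 1) % 10 = 3 ∨ (m + 1) % 10 = 6 ∨ (m + 1) % 10 = 9
        · rw [if_pos h, if_pos h]
        · rw [if_neg h, if_neg h]
          exact ih g ((m + 1) / 10) (by omega) (by omega)

lemma avoidN_eq (m : Nat) :
    avoidN m = if m = 0 then true
      else if m % 10 = 3 ∨ m % 10 = 6 ∨ m % 10 = 9 then false else avoidN (m / 10) := by
  rcases m with _ | k
  · simp [avoidN, avoidA]
  · show avoidA (k + 1) (k + 1) = _
    simp only [avoidA, Nat.succ_ne_zero, if_false]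
    split_ifs with h
    · rfl
    · exact avoidA_congr k ((k + 1) / 10) ((k + 1) / 10) (by omega) le_rfl

lemma avoidN_lt_ten (m : Nat) (h : m < 10) :
    avoidN m = !(m = 3 ∨ m = 6 ∨ m = 9 : Bool) := by
  rw [avoidN_eq]
  rcases Nat.eq_zero_or_pos m with h0 | h0
  · subst h0; decide
  · have hm : m % 10 = m := Nat.mod_eq_of_lt h
    have hd : m / 10 = 0 := Nat.div_eq_of_lt h
    rw [if_neg (by omega), hm, hd]
    by_cases h1 : m = 3 ∨ m = 6 ∨ m = 9
    · rw [if_pos h1]; simp [h1]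
    · rw [if_neg h1]
      have hz : avoidN 0 = true := rfl
      rw [hz]; simp [h1]

lemma cnt0_succ (m : Nat) : cnt0 (m + 1) = cnt0 m + (if avoidN m then 1 else 0) := by
  simp only [cnt0, List.range_succ, List.countP_append, List.countP_cons, List.countP_nil]
  cases h : avoidN m
  · simp
  · simp

-- ===== A-side characterisation =====

lemma solInner_eq (cs : List Char) : ∀ a, solInner a cs = a + (if hitL cs then 1 else 0) := by
  induction cs with
  | nil => intro a; simp [solInner, hitL]
  | cons c cs ih =>
    intro a
    have hc : hitC c = (c = '3' || c = '6' || c = '9') := rfl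
    simp only [solInner]
    by_cases h : (c = '3' || c = '6' || c = '9') = true
    · rw [if_pos h]
      have hh : hitL (c :: cs) = true := by
        simp only [hitL, List.any_cons, hc, h, Bool.true_or]
      rw [hh, if_pos rfl]
    · rw [if_neg h, ih a]
      have h' : (c = '3' || c = '6' || c = '9') = false := by simpa using h
      have hh : hitL (c :: cs) = hitL cs := by
        simp only [hitL, List.any_cons, hc, h', Bool.false_or]
      rw [hh]

lemma hitC_digitChar (d : Nat) (hd : d < 10) :
    hitC (Nat.digitChar d) = (d = 3 ∨ d = 6 ∨ d = 9 : Bool) := by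
  interval_cases d <;> decide

lemma hit_toDigitsCore :
    ∀ fuel n ds, n < fuel →
      hitL (Nat.toDigitsCore 10 fuel n ds) = (!avoidN n || hitL ds) := by
  intro fuel
  induction fuel with
  | zero => omega
  | succ f ih =>
    intro n ds hn
    show hitL (if n / 10 = 0 then Nat.digitChar (n % 10) :: ds
      else Nat.toDigitsCore 10 f (n / 10) (Nat.digitChar (n % 10) :: ds)) = _
    have hcons : ∀ es, hitL (Nat.digitChar (n % 10) :: es)
        = (hitC (Nat.digitChar (n % 10)) || hitL es) := by
      intro es; simp [hitL]
    by_cases h0 : n / 10 = 0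
    · have hlt : n < 10 := by
        by_contra hge
        have := Nat.div_le_div_right (c := 10) (Nat.le_of_not_lt hge)
        omega
      rw [if_pos h0, hcons, hitC_digitChar _ (by omega), Nat.mod_eq_of_lt hlt,
        avoidN_lt_ten n hlt]
      cases hh : (n = 3 ∨ n = 6 ∨ n = 9 : Bool)
      · simp
      · simp
    · have hge : 10 ≤ n := by
        by_contra hlt
        exact h0 (Nat.div_eq_of_lt (by omega))
      rw [if_neg h0, ih (n / 10) _ (by omega), hcons,
        hitC_digitChar _ (Nat.mod_lt _ (by omega)), avoidN_eq n, if_neg (by omega)]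
      by_cases hm : n % 10 = 3 ∨ n % 10 = 6 ∨ n % 10 = 9
      · simp [hm]
      · rw [if_neg hm]
        cases hv : avoidN (n / 10)
        · simp
        · simp [hm]

lemma hit_toDigits (m : Nat) : hitL (Nat.toDigits 10 m) = !avoidN m := by
  show hitL (Nat.toDigitsCore 10 (m + 1) m []) = _
  rw [hit_toDigitsCore (m + 1) m [] (by omega)]
  simp [hitL]

lemma hit_toStr_pos (x : Int) (hx : 0 < x) :
    hitL (PySem.Int.toStr x).toList = !avoidN x.toNat := by
  rw [PySem.Int.toList_toStr]
  show hitL (if x < 0 then '-' :: Nat.toDigits 10 x.natAbs else Nat.toDigits 10 x.toNat) = _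
  rw [if_neg (by omega)]
  exact hit_toDigits x.toNat

lemma foldl_solInner (l : List Int) :
    ∀ a, l.foldl (fun answer number => solInner answer (PySem.Int.toStr number).toList) a
      = a + (l.countP (fun x => hitL (PySem.Int.toStr x).toList) : Int) := by
  induction l with
  | nil => intro a; simp
  | cons x l ih =>
    intro a
    rw [List.foldl_cons, ih, List.countP_cons, solInner_eq]
    cases h : hitL (PySem.Int.toStr x).toList
    · simp
    · simp
      ring

lemma range_hit_cnt (m : Nat) :
    (List.range m).countP (fun k => !avoidN (k + 1)) + cnt0 (m + 1) = m + 1 := by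
  induction m with
  | zero => decide
  | succ m ih =>
    rw [List.range_succ, List.countP_append, cnt0_succ (m + 1)]
    simp only [List.countP_singleton]
    cases h : avoidN (m + 1) <;> simp <;> omega

lemma solution_char (n : Int) (hn : 0 < n) :
    solution n = n - ((cnt0 (n.toNat + 1) : Int) - 1) := by
  unfold solution
  rw [foldl_solInner, PySem.List.pyRange_one, List.countP_map]
  have hcong : (List.range (n + 1 - 1).toNat).countP
        ((fun x => hitL (PySem.Int.toStr x).toList) ∘ (fun k : Nat => 1 + (k : Int)))
      = (List.range (n + 1 - 1).toNat).countP (fun k => !avoidN (k + 1)) := by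
    apply List.countP_congr
    intro k _
    simp only [Function.comp_apply]
    rw [hit_toStr_pos (1 + (k : Int)) (by omega)]
    have hk : (1 + (k : Int)).toNat = k + 1 := by omega
    rw [hk]
  rw [hcong]
  have hN : (n + 1 - 1).toNat = n.toNat := by omega
  rw [hN]
  have hsum := range_hit_cnt n.toNat
  have hle : (List.range n.toNat).countP (fun k => !avoidN (k + 1))
      ≤ (List.range n.toNat).length := List.countP_le_length
  rw [List.length_range] at hle
  omega

-- ===== B-side characterisation =====

def cS (r : Nat) : Nat := ([0, 1, 2, 4, 5, 7, 8] : List Nat).countP (fun d => d ≤ r)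

lemma countLeB_cast (r : Nat) (h : r < 10) : countLeB (r : Int) = (cS r : Int) := by
  interval_cases r <;> decide

lemma okB_eq : ∀ N : Nat, ∀ q : Int, q.toNat ≤ N → 0 ≤ q → okB q = avoidN q.toNat := by
  intro N
  induction N with
  | zero =>
    intro q hN h0
    have hq : q = 0 := by omega
    subst hq
    rw [okB]
    decide
  | succ N ih =>
    intro q hN h0
    rw [okB]
    by_cases hq : 0 < q
    · rw [dif_pos hq]
      have hm : PySem.Int.mod q 10 = q % 10 := PySem.Int.mod_eq_emod_of_pos (by omega)
      have hd : PySem.Int.floordiv q 10 = q / 10 := PySem.Int.floordiv_eq_ediv_of_pos (by omega)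
      have hmn : q % 10 = ((q.toNat % 10 : Nat) : Int) := by omega
      have hnz : ¬(q.toNat = 0) := by omega
      have h1 : (q / 10).toNat = q.toNat / 10 := by omega
      have hrec : okB (PySem.Int.floordiv q 10) = avoidN (q.toNat / 10) := by
        rw [hd, ← h1]
        exact ih (q / 10) (by omega) (by omega)
      by_cases hmem : q.toNat % 10 = 3 ∨ q.toNat % 10 = 6 ∨ q.toNat % 10 = 9
      · have hc : ([3, 6, 9] : List Int).contains (PySem.Int.mod q 10) = true := by
          rw [hm, hmn]
          rcases hmem with h | h | h <;> rw [h] <;> decide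
        rw [avoidN_eq, if_neg hnz, if_pos hmem, hc]
        simp
      · have hc : ([3, 6, 9] : List Int).contains (PySem.Int.mod q 10) = false := by
          rw [hm, hmn]
          simp only [List.contains_eq_mem, decide_eq_false_iff_not, List.mem_cons,
            List.not_mem_nil, or_false]
          intro hmem2
          rcases hmem2 with h | h | h <;> omega
        rw [avoidN_eq, if_neg hnz, if_neg hmem, hc]
        simpa using hrec
    · rw [dif_neg hq]
      have hq0 : q = 0 := by omega
      subst hq0
      decide

lemma L2 (Q : Nat) : ∀ R : Nat, R ≤ 9 →
    cnt0 (10 * Q + R + 1) = cnt0 (10 * Q) + (if avoidN Q then cS R else 0) := by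
  intro R
  induction R with
  | zero =>
    intro _
    rw [cnt0_succ]
    have hav : avoidN (10 * Q) = avoidN Q := by
      rcases Nat.eq_zero_or_pos Q with h0 | h0
      · subst h0; rfl
      · rw [avoidN_eq (10 * Q), if_neg (by omega)]
        have h1 : 10 * Q % 10 = 0 := by omega
        have h2 : 10 * Q / 10 = Q := by omega
        rw [h1, h2, if_neg (by omega)]
    rw [hav]
    cases h : avoidN Q <;> simp [cS]
  | succ R ih =>
    intro hR
    have hstep : cnt0 (10 * Q + (R + 1) + 1) = cnt0 (10 * Q + R + 1)
        + (if avoidN (10 * Q + (R + 1)) then 1 else 0) := cnt0_succ _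
    have hav : avoidN (10 * Q + (R + 1))
        = (!(R + 1 = 3 ∨ R + 1 = 6 ∨ R + 1 = 9 : Bool) && avoidN Q) := by
      rw [avoidN_eq, if_neg (by omega)]
      have h1 : (10 * Q + (R + 1)) % 10 = R + 1 := by omega
      have h2 : (10 * Q + (R + 1)) / 10 = Q := by omega
      rw [h1, h2]
      by_cases hm : R + 1 = 3 ∨ R + 1 = 6 ∨ R + 1 = 9
      · simp
      · simp
    rw [hstep, ih (by omega), hav]
    have hR8 : R ≤ 8 := by omega
    have hcS : cS (R + 1) = cS R + (if (R + 1 = 3 ∨ R + 1 = 6 ∨ R + 1 = 9 : Bool) then 0 else 1) := by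
      interval_cases R <;> decide
    rw [hcS]
    cases hq : avoidN Q
    · simp
    · cases hm : (R + 1 = 3 ∨ R + 1 = 6 ∨ R + 1 = 9 : Bool) <;> simp; omega

lemma L1 : ∀ Q : Nat, cnt0 (10 * Q) = 7 * cnt0 Q := by
  intro Q
  induction Q with
  | zero => decide
  | succ Q ih =>
    have h1 : 10 * (Q + 1) = 10 * Q + 9 + 1 := by ring
    rw [h1, L2 Q 9 (by omega), ih, cnt0_succ]
    have hcS : cS 9 = 7 := by decide
    cases h : avoidN Q
    · simp
    · simp [hcS]
      ring

lemma avB_eq : ∀ N : Nat, ∀ n : Int, n.toNat ≤ N → 0 ≤ n → avB n = (cnt0 (n.toNat + 1) : Int) := by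
  intro N
  induction N with
  | zero =>
    intro n hN h0
    have hn : n = 0 := by omega
    subst hn
    rw [avB]
    decide
  | succ N ih =>
    intro n hN h0
    rw [avB, if_neg (by omega)]
    by_cases hsmall : n < 10
    · rw [if_pos hsmall]
      have : n = ((n.toNat : Nat) : Int) := by omega
      rw [this]
      have hlt : n.toNat < 10 := by omega
      interval_cases h : n.toNat <;> decide
    · rw [if_neg hsmall]
      have hd : PySem.Int.floordiv n 10 = n / 10 := PySem.Int.floordiv_eq_ediv_of_pos (by omega)
      have hm : PySem.Int.mod n 10 = n % 10 := PySem.Int.mod_eq_emod_of_pos (by omega)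
      set Q : Nat := n.toNat / 10 with hQdef
      set R : Nat := n.toNat % 10 with hRdef
      have hQ : (n / 10).toNat = Q := by omega
      have hQ1 : 1 ≤ Q := by omega
      have hq : PySem.Int.floordiv n 10 - 1 = (((Q - 1 : Nat)) : Int) := by
        rw [hd]; omega
      have harg : (((Q - 1 : Nat) : Int)).toNat + 1 = Q := by omega
      have hIH : avB (PySem.Int.floordiv n 10 - 1) = (cnt0 Q : Int) := by
        rw [hq, ih _ (by omega) (by omega), harg]
      have hok : okB (PySem.Int.floordiv n 10) = avoidN Q := by
        rw [okB_eq (N + 1) _ (by omega) (by rw [hd]; omega), hd, hQ]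
      have hR : PySem.Int.mod n 10 = ((R : Nat) : Int) := by rw [hm]; omega
      have hCL : countLeB (PySem.Int.mod n 10) = (cS R : Int) := by
        rw [hR, countLeB_cast R (by omega)]
      have hsum : n.toNat + 1 = 10 * Q + R + 1 := by omega
      rw [hIH, hok, hCL, hsum, L2 Q R (by omega), L1 Q]
      cases avoidN Q
      · simp
      · simp

-- ===== VERDICT (by name: the statement is the Claim_ definition above) =====
theorem solution_spec : Claim_equal_solution := by
  intro n _
  unfold Spec_solution solution_alt
  by_cases hn : n ≤ 0
  · rw [if_pos hn]
    unfold solution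
    rw [PySem.List.pyRange_one_eq_nil (by omega)]
    rfl
  · rw [if_neg hn]
    rw [solution_char n (by omega), avB_eq n.toNat n (by omega) (by omega)]
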